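-- pv_equiv track=rewrite | github.com/Minhao-Zhang/Hey-Steve | hey_steve/processing/chunking_helper.py | replace_chunk_tags
-- ===== SOURCE A (Python) =====
-- def replace_chunk_tags(md_content):
--     """
--     Replaces <chunk> </chunk> tag pairs in a string with numbered <chunk__XXX> </chunk_XXX> tags.
--
--     Args:
--         md_content: The input string containing md content with <chunk> </chunk> tags.
--
--     Returns:
--         A string with the <chunk> </chunk> tags replaced by numbered tags.
--     """
--     counter = 1
--     output_content = ""
--     start_index = 0
--
--     while True:
--         start_tag_index = md_content.find("<chunk>", start_index)
--         if start_tag_index == -1: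
--             # No more <chunk> tags found, append the rest of the content
--             output_content += md_content[start_index:]
--             break
--
--         end_tag_index = md_content.find(
--             "</chunk>", start_tag_index + len("<chunk>"))
--         if end_tag_index == -1:
--             # This should not happen based on the problem description (always in pairs)
--             # But as a safety net, handle it - maybe just append the rest as is.
--             output_content += md_content[start_index:]
--             break
--
--         # Append the content before the current <chunk> tag
--         output_content += md_content[start_index:start_tag_index]
--
--         # Construct the new tags with counter
--         # Format counter to 3 digits e.g., 001, 002, ...
--         chunk_number_str = str(counter).zfill(3)
--         new_start_tag = f"<chunk__{chunk_number_str}>"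
--         new_end_tag = f"</chunk_{chunk_number_str}>"
--
--         output_content += new_start_tag
--         # Content inside the tags, if any. (Though in example, tags seem empty)
--         output_content += md_content[start_tag_index +
--                                      len("<chunk>"):end_tag_index]
--         output_content += new_end_tag
--
--         # Update start_index to search for the next pair after the current </chunk> tag
--         start_index = end_tag_index + len("</chunk>")
--         counter += 1
--
--     return output_content
-- ===== SOURCE B (Python) =====
-- def replace_chunk_tags(md_content):
--     """
--     Replaces <chunk> </chunk> tag pairs in a string with numbered <chunk__XXX> </chunk_XXX> tags.
--
--     Different strategy: split the input on the closing tag "</chunk>"; every split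
--     piece but the last absorbed one closing tag, so a piece containing an opening
--     "<chunk>" is exactly one matched pair (the tags cannot overlap each other),
--     while a piece without one carried an unmatched closing tag, which stays literal.
--     """
--     segments = md_content.split("</chunk>")
--     parts = []
--     n = 1
--     for seg in segments[:-1]:
--         o = seg.find("<chunk>")
--         if o == -1:
--             # a closing tag with no opening tag before it: keep it literally
--             parts.append(seg + "</chunk>")
--         else:
--             num = str(n).zfill(3)
--             parts.append(seg[:o] + "<chunk__" + num + ">"
--                          + seg[o + 7:] + "</chunk_" + num + ">")
--             n += 1
--     parts.append(segments[-1])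
--     return "".join(parts)
-- ===== Notes on version B (the rewrite author's own statement) =====
-- stated objective: alternative
-- what changed: B replaces A's single find/find index-tracking while-loop with a split-driven pass: it splits the input on "</chunk>" once, then each split piece is independently either a matched pair (it contains "<chunk>") that gets the next number, or an unmatched closing tag restored literally; correctness rests on the fact that the tags cannot overlap, so every matched pair lies inside one split piece.
import Mathlib
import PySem

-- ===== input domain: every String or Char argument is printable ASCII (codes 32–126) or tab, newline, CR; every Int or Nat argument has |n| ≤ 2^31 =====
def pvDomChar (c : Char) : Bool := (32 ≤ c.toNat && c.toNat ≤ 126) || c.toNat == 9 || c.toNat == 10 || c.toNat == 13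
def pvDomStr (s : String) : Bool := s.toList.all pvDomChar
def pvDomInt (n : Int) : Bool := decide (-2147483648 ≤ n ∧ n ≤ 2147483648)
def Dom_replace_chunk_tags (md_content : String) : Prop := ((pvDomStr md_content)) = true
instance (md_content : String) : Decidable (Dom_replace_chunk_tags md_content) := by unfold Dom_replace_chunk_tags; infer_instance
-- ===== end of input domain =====

-- B replaces A's single find/find index-tracking while-loop with a split-driven pass: split on
-- "</chunk>" once, then number each split piece containing "<chunk>" and restore the closing
-- tag literally on the pieces that do not (alternative decomposition, same cost).

-- the two tag literals, shared by both ports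
def pvOpen : List Char := "<chunk>".toList
def pvClose : List Char := "</chunk>".toList

-- str(counter).zfill(3) — the identical expression occurs in both Python sources
def pvPad3 (n : Int) : List Char := PySem.Chars.zfill (PySem.Int.toChars n) 3

-- ===== PORT A =====
-- A's `while True` loop; fuel only bounds the iteration count (each pass moves start_index
-- forward by at least 15 characters, so md.length + 1 passes always suffice; fuel 0 unreachable)
def pvALoop (md : List Char) (fuel : Nat) (start : Nat) (counter : Int) (out : List Char) :
    List Char :=
  match fuel with
  | 0 => out
  | fuel + 1 =>
    if PySem.Chars.findFrom md pvOpen ↑start = -1 then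
      out ++ PySem.Chars.slice md (some ↑start) none
    else if PySem.Chars.findFrom md pvClose (PySem.Chars.findFrom md pvOpen ↑start + 7) = -1 then
      out ++ PySem.Chars.slice md (some ↑start) none
    else
      pvALoop md fuel
        ((PySem.Chars.findFrom md pvClose (PySem.Chars.findFrom md pvOpen ↑start + 7)).toNat + 8)
        (counter + 1)
        (out ++ PySem.Chars.slice md (some ↑start) (some (PySem.Chars.findFrom md pvOpen ↑start))
             ++ ("<chunk__".toList ++ pvPad3 counter ++ ">".toList)
             ++ PySem.Chars.slice md (some (PySem.Chars.findFrom md pvOpen ↑start + 7))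
                  (some (PySem.Chars.findFrom md pvClose (PySem.Chars.findFrom md pvOpen ↑start + 7)))
             ++ ("</chunk_".toList ++ pvPad3 counter ++ ">".toList))

def replace_chunk_tags (md_content : String) : String :=
  String.ofList (pvALoop md_content.toList (md_content.toList.length + 1) 0 1 [])

-- ===== PORT B =====
-- md_content.split("</chunk>"), hand-ported step for step (exact for this nonempty separator:
-- Python's split cuts at the leftmost occurrence and recurses on the text after it)
-- length fact the recursion of pvSplitClose cites for termination
lemma pvSplitTerm (s : List Char) (h : ¬ PySem.Chars.find s pvClose = -1) :
    (s.drop ((PySem.Chars.find s pvClose).toNat + 8)).length < s.length := by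
  have h0 : 0 ≤ PySem.Chars.find s pvClose := by
    have := PySem.Chars.neg_one_le_find s pvClose; omega
  have hl := (PySem.Chars.find_spec h0).1.length_le
  have h8 : pvClose.length = 8 := by decide
  simp only [List.length_drop] at hl ⊢
  omega

def pvSplitClose (s : List Char) : List (List Char) :=
  if PySem.Chars.find s pvClose = -1 then [s]
  else
    s.take (PySem.Chars.find s pvClose).toNat ::
      pvSplitClose (s.drop ((PySem.Chars.find s pvClose).toNat + 8))
termination_by s.length
decreasing_by
  rename_i h
  exact pvSplitTerm s h

-- B's `for seg in segments[:-1]` loop plus the final append and ''.join; the [] branch is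
-- unreachable (split always returns at least one piece).  seg[:o] / seg[o+7:] are the take
-- and drop below: that branch guarantees o = seg.find("<chunk>") ≥ 0.
def pvBGo (segs : List (List Char)) (n : Int) (parts : List (List Char)) : List Char :=
  match segs with
  | [] => PySem.Chars.join [] parts
  | [last] => PySem.Chars.join [] (parts ++ [last])
  | seg :: rest =>
    if PySem.Chars.find seg pvOpen = -1 then
      pvBGo rest n (parts ++ [seg ++ pvClose])
    else
      pvBGo rest (n + 1)
        (parts ++ [seg.take (PySem.Chars.find seg pvOpen).toNat
             ++ ("<chunk__".toList ++ pvPad3 n ++ ">".toList)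
             ++ seg.drop ((PySem.Chars.find seg pvOpen).toNat + 7)
             ++ ("</chunk_".toList ++ pvPad3 n ++ ">".toList)])

def replace_chunk_tags_alt (md_content : String) : String :=
  String.ofList (pvBGo (pvSplitClose md_content.toList) 1 [])

-- ===== PRECONDITION & SPEC =====
def Spec_replace_chunk_tags (md_content : String) (out : String) : Prop := out = replace_chunk_tags_alt md_content
instance (md_content : String) (out : String) : Decidable (Spec_replace_chunk_tags md_content out) := by unfold Spec_replace_chunk_tags; infer_instance

-- ===== CLAIM (what is proved, stated in full; the proofs are below) =====
def Claim_equal_replace_chunk_tags : Prop := ∀ (md_content : String), Dom_replace_chunk_tags md_content → Spec_replace_chunk_tags md_content (replace_chunk_tags md_content)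

-- ===== LEMMAS AND PROOFS =====

-- length fact the recursion of pvRun cites for termination
lemma pvRunTerm (s : List Char) (h1 : ¬ PySem.Chars.find s pvOpen = -1)
    (h2 : ¬ PySem.Chars.find (s.drop ((PySem.Chars.find s pvOpen).toNat + 7)) pvClose = -1) :
    (s.drop ((PySem.Chars.find s pvOpen).toNat + 7
      + (PySem.Chars.find (s.drop ((PySem.Chars.find s pvOpen).toNat + 7)) pvClose).toNat
      + 8)).length < s.length := by
  have ho : 0 ≤ PySem.Chars.find s pvOpen := by
    have := PySem.Chars.neg_one_le_find s pvOpen; omega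
  have hol := (PySem.Chars.find_spec ho).1.length_le
  have hc : 0 ≤ PySem.Chars.find (s.drop ((PySem.Chars.find s pvOpen).toNat + 7)) pvClose := by
    have := PySem.Chars.neg_one_le_find (s.drop ((PySem.Chars.find s pvOpen).toNat + 7)) pvClose
    omega
  have hcl := (PySem.Chars.find_spec hc).1.length_le
  have h8 : pvClose.length = 8 := by decide
  simp only [List.length_drop] at hol hcl ⊢
  omega

-- reference function: what the remaining suffix rewrites to (used only by the proofs)
def pvRun (s : List Char) (n : Int) : List Char :=
  if PySem.Chars.find s pvOpen = -1 then s
  else if PySem.Chars.find (s.drop ((PySem.Chars.find s pvOpen).toNat + 7)) pvClose = -1 then s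
  else
    s.take (PySem.Chars.find s pvOpen).toNat
      ++ ("<chunk__".toList ++ pvPad3 n ++ ">".toList)
      ++ (s.drop ((PySem.Chars.find s pvOpen).toNat + 7)).take
           (PySem.Chars.find (s.drop ((PySem.Chars.find s pvOpen).toNat + 7)) pvClose).toNat
      ++ ("</chunk_".toList ++ pvPad3 n ++ ">".toList)
      ++ pvRun (s.drop ((PySem.Chars.find s pvOpen).toNat + 7
           + (PySem.Chars.find (s.drop ((PySem.Chars.find s pvOpen).toNat + 7)) pvClose).toNat
           + 8)) (n + 1)
termination_by s.length
decreasing_by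
  rename_i h1 h2
  exact pvRunTerm s h1 h2

lemma pvJoinNil (xs : List (List Char)) : PySem.Chars.join [] xs = xs.flatten := by
  induction xs with
  | nil => rw [PySem.Chars.join_nil]; rfl
  | cons a xs ih =>
    cases xs with
    | nil => rw [PySem.Chars.join_singleton]; simp
    | cons b ys =>
      rw [PySem.Chars.join_cons_cons] at *
      simp_all

lemma pvDropAppend (a b : List Char) (k : Nat) : (a ++ b).drop (a.length + k) = b.drop k := by
  rw [← List.drop_drop, List.drop_left]

lemma pvTakeAppend (a b : List Char) (k : Nat) : (a ++ b).take (a.length + k) = a ++ b.take k := by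
  simp [List.take_append]

lemma pvPrefixGet (p l : List Char) (h : p <+: l) (k : Nat) (hk : k < p.length) :
    l[k]? = p[k]? := by
  obtain ⟨t, rfl⟩ := h
  rw [List.getElem?_append_left hk]

-- find points at k as soon as there is an occurrence at k and none earlier
lemma pvFindEq (s p : List Char) (k : Nat) (h1 : p <+: s.drop k)
    (h2 : ∀ m, m < k → ¬ p <+: s.drop m) : PySem.Chars.find s p = (k : Int) := by
  have hinf : p <:+: s := by
    obtain ⟨t, ht⟩ := h1
    exact ⟨s.take k, t, by rw [List.append_assoc, ht, List.take_append_drop]⟩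
  have hne : PySem.Chars.find s p ≠ -1 := by
    rw [Ne, PySem.Chars.find_eq_neg_one_iff]; exact fun hcon => hcon hinf
  have h0 : 0 ≤ PySem.Chars.find s p := by
    have := PySem.Chars.neg_one_le_find s p; omega
  obtain ⟨hp, hmin⟩ := PySem.Chars.find_spec h0
  rcases lt_trichotomy (PySem.Chars.find s p).toNat k with h | h | h
  · exact absurd hp (h2 _ h)
  · omega
  · exact absurd h1 (hmin k h)

-- "<chunk>" cannot overlap a "</chunk>" occurrence
lemma pvNoOverlap (s : List Char) (i j : Nat) (hc : pvClose <+: s.drop j)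
    (ho : pvOpen <+: s.drop i) (h1 : ¬ i + 7 ≤ j) (h2 : i < j + 8) : False := by
  have hcg : ∀ kk, kk < 8 → s[j+kk]? = pvClose[kk]? := by
    intro kk hk
    rw [← List.getElem?_drop]
    exact pvPrefixGet _ _ hc kk (by simp [pvClose]; omega)
  have hog : ∀ kk, kk < 7 → s[i+kk]? = pvOpen[kk]? := by
    intro kk hk
    rw [← List.getElem?_drop]
    exact pvPrefixGet _ _ ho kk (by simp [pvOpen]; omega)
  obtain ⟨d, hd, hid⟩ : ∃ d, d < 14 ∧ i + 6 = j + d := ⟨i + 6 - j, by omega, by omega⟩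
  interval_cases d <;>
    [ (have e1 := hog 6 (by omega)); (have e1 := hog 5 (by omega));
      (have e1 := hog 4 (by omega)); (have e1 := hog 3 (by omega));
      (have e1 := hog 2 (by omega)); (have e1 := hog 1 (by omega));
      (have e1 := hog 1 (by omega)); (have e1 := hog 0 (by omega));
      (have e1 := hog 0 (by omega)); (have e1 := hog 0 (by omega));
      (have e1 := hog 0 (by omega)); (have e1 := hog 0 (by omega));
      (have e1 := hog 0 (by omega)); (have e1 := hog 0 (by omega))] <;>
    [ (have e2 := hcg 0 (by omega); rw [show j + 0 = i + 6 by omega] at e2);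
      (have e2 := hcg 0 (by omega); rw [show j + 0 = i + 5 by omega] at e2);
      (have e2 := hcg 0 (by omega); rw [show j + 0 = i + 4 by omega] at e2);
      (have e2 := hcg 0 (by omega); rw [show j + 0 = i + 3 by omega] at e2);
      (have e2 := hcg 0 (by omega); rw [show j + 0 = i + 2 by omega] at e2);
      (have e2 := hcg 0 (by omega); rw [show j + 0 = i + 1 by omega] at e2);
      (have e2 := hcg 1 (by omega); rw [show j + 1 = i + 1 by omega] at e2);
      (have e2 := hcg 1 (by omega); rw [show j + 1 = i + 0 by omega] at e2);
      (have e2 := hcg 2 (by omega); rw [show j + 2 = i + 0 by omega] at e2);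
      (have e2 := hcg 3 (by omega); rw [show j + 3 = i + 0 by omega] at e2);
      (have e2 := hcg 4 (by omega); rw [show j + 4 = i + 0 by omega] at e2);
      (have e2 := hcg 5 (by omega); rw [show j + 5 = i + 0 by omega] at e2);
      (have e2 := hcg 6 (by omega); rw [show j + 6 = i + 0 by omega] at e2);
      (have e2 := hcg 7 (by omega); rw [show j + 7 = i + 0 by omega] at e2)] <;>
    rw [e2] at e1 <;> simp [pvOpen, pvClose] at e1

lemma pvSplitNe (s : List Char) : pvSplitClose s ≠ [] := by
  rw [pvSplitClose.eq_def]
  split <;> simp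

-- skipping an opening-tag-free prefix of the remaining text
lemma pvSkip (a rest : List Char) (n : Int)
    (h : ∀ i, i < a.length → ¬ pvOpen <+: (a ++ rest).drop i) :
    pvRun (a ++ rest) n = a ++ pvRun rest n := by
  have hdropEq : ∀ (m : Nat), (a ++ rest).drop (a.length + m) = rest.drop m :=
    pvDropAppend a rest
  rw [pvRun.eq_def]
  conv_rhs => rw [pvRun.eq_def]
  by_cases hi : PySem.Chars.find (a ++ rest) pvOpen = -1
  · have hr : PySem.Chars.find rest pvOpen = -1 := by
      rw [PySem.Chars.find_eq_neg_one_iff] at hi ⊢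
      exact fun hinfix => hi (hinfix.trans (List.suffix_append a rest).isInfix)
    simp [hi, hr]
  · have h0 : 0 ≤ PySem.Chars.find (a ++ rest) pvOpen := by
      have := PySem.Chars.neg_one_le_find (a ++ rest) pvOpen; omega
    obtain ⟨hp, hmin⟩ := PySem.Chars.find_spec h0
    have hge : a.length ≤ (PySem.Chars.find (a ++ rest) pvOpen).toNat := by
      by_contra hlt
      exact h _ (by omega) hp
    set iN := (PySem.Chars.find (a ++ rest) pvOpen).toNat with hiN
    have hfr : PySem.Chars.find rest pvOpen = ((iN - a.length : Nat) : Int) := by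
      apply pvFindEq
      · rw [← hdropEq (iN - a.length),
            show a.length + (iN - a.length) = iN from by omega]
        exact hp
      · intro m hm hcon
        exact hmin (a.length + m) (by omega) (by rw [hdropEq]; exact hcon)
    rw [if_neg hi]
    rw [hfr]
    rw [if_neg (show ¬(((iN - a.length : Nat) : Int) = -1) from by omega)]
    simp only [Int.toNat_natCast]
    have e1 : (a ++ rest).drop (iN + 7) = rest.drop (iN - a.length + 7) := by
      rw [show iN + 7 = a.length + (iN - a.length + 7) from by omega, hdropEq]
    rw [e1]
    by_cases hj : PySem.Chars.find (rest.drop (iN - a.length + 7)) pvClose = -1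
    · rw [if_pos hj, if_pos hj]
    · rw [if_neg hj, if_neg hj]
      have e2 : (a ++ rest).take iN = a ++ rest.take (iN - a.length) := by
        rw [show iN = a.length + (iN - a.length) from by omega, pvTakeAppend,
            show a.length + (iN - a.length) - a.length = iN - a.length from by omega]
      have e3 : (a ++ rest).drop (iN + 7 +
            (PySem.Chars.find (rest.drop (iN - a.length + 7)) pvClose).toNat + 8)
          = rest.drop (iN - a.length + 7 +
            (PySem.Chars.find (rest.drop (iN - a.length + 7)) pvClose).toNat + 8) := by
        rw [show iN + 7 + (PySem.Chars.find (rest.drop (iN - a.length + 7)) pvClose).toNat + 8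
            = a.length + (iN - a.length + 7 +
              (PySem.Chars.find (rest.drop (iN - a.length + 7)) pvClose).toNat + 8) from by omega,
          hdropEq]
      rw [e2, e3]
      simp [List.append_assoc]

-- main invariant of B: processing the split pieces realises pvRun
lemma pvBKey : ∀ (k : Nat) (s : List Char), s.length ≤ k → ∀ (n : Int) (parts : List (List Char)),
    pvBGo (pvSplitClose s) n parts = parts.flatten ++ pvRun s n := by
  intro k
  induction k with
  | zero =>
    intro s hk n parts
    have hnil : s = [] := by cases s <;> simp_all
    subst hnil
    rw [pvSplitClose.eq_def]
    rw [if_pos (show PySem.Chars.find [] pvClose = -1 from by decide)]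
    rw [pvBGo, pvJoinNil, pvRun.eq_def]
    simp [show PySem.Chars.find ([] : List Char) pvOpen = -1 from by decide]
  | succ k ih =>
    intro s hk n parts
    rw [pvSplitClose.eq_def]
    by_cases hcf : PySem.Chars.find s pvClose = -1
    · rw [if_pos hcf, pvBGo, pvJoinNil]
      have hnoc : ¬ pvClose <:+: s := by rwa [← PySem.Chars.find_eq_neg_one_iff]
      have hrun : pvRun s n = s := by
        rw [pvRun.eq_def]
        by_cases ho : PySem.Chars.find s pvOpen = -1
        · simp [ho]
        · have hj : PySem.Chars.find (s.drop ((PySem.Chars.find s pvOpen).toNat + 7)) pvClose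
              = -1 := by
            rw [PySem.Chars.find_eq_neg_one_iff]
            exact fun hinfix => hnoc (hinfix.trans (List.drop_suffix _ _).isInfix)
          simp [ho, hj]
      rw [hrun]; simp
    · rw [if_neg hcf]
      have hc0 : 0 ≤ PySem.Chars.find s pvClose := by
        have := PySem.Chars.neg_one_le_find s pvClose; omega
      obtain ⟨hcp, hcmin⟩ := PySem.Chars.find_spec hc0
      set j := (PySem.Chars.find s pvClose).toNat with hjdef
      have hjlen : j + 8 ≤ s.length := by
        have := hcp.length_le
        simp only [List.length_drop, show pvClose.length = 8 from by decide] at this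
        omega
      have hsegl : (s.take j).length = j := by
        rw [List.length_take]; omega
      have hsplit : s.drop j = pvClose ++ s.drop (j + 8) := by
        obtain ⟨t, ht⟩ := hcp
        have hdt : s.drop (j + 8) = t := by
          rw [← List.drop_drop, ← ht]
          simp [pvClose]
        rw [hdt, ← ht]
      have hs : s = s.take j ++ (pvClose ++ s.drop (j + 8)) := by
        rw [← hsplit, List.take_append_drop]
      obtain ⟨x, L', hxl⟩ : ∃ x L', pvSplitClose (s.drop (j + 8)) = x :: L' := by
        rcases hh : pvSplitClose (s.drop (j + 8)) with _ | ⟨x, L'⟩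
        · exact absurd hh (pvSplitNe _)
        · exact ⟨x, L', rfl⟩
      have hrlen : (s.drop (j + 8)).length ≤ k := by
        simp only [List.length_drop]; omega
      rw [hxl, pvBGo.eq_def]
      by_cases ho : PySem.Chars.find (s.take j) pvOpen = -1
      · -- no opening tag in this piece: the closing tag stays literal
        simp only [ho, reduceIte]
        rw [← hxl, ih _ hrlen n (parts ++ [s.take j ++ pvClose])]
        have hskip : pvRun s n = (s.take j ++ pvClose) ++ pvRun (s.drop (j + 8)) n := by
          have hsk := pvSkip (s.take j ++ pvClose) (s.drop (j + 8)) n ?_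
          · rw [← hsk]; congr 1
            rw [List.append_assoc, ← hs]
          · intro i hi hcon
            rw [List.append_assoc, ← hs] at hcon
            have hilt : i < j + 8 := by
              simp only [List.length_append, hsegl,
                show pvClose.length = 8 from by decide] at hi
              omega
            by_cases hile : i + 7 ≤ j
            · -- the occurrence would lie inside s.take j, but that piece has no opening tag
              have hin : pvOpen <+: (s.take j).drop i := by
                rw [List.drop_take, List.prefix_take_iff]
                exact ⟨hcon, by simp [pvOpen]; omega⟩
              have hinf : pvOpen <:+: s.take j :=
                hin.isInfix.trans (List.drop_suffix _ _).isInfix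
              rw [PySem.Chars.find_eq_neg_one_iff] at ho
              exact ho hinf
            · exact pvNoOverlap s i j hcp hcon hile hilt
        rw [hskip]; simp
      · -- this piece is one matched pair
        simp only [ho, reduceIte]
        have ho0 : 0 ≤ PySem.Chars.find (s.take j) pvOpen := by
          have := PySem.Chars.neg_one_le_find (s.take j) pvOpen; omega
        obtain ⟨hop, homin⟩ := PySem.Chars.find_spec ho0
        set o := (PySem.Chars.find (s.take j) pvOpen).toNat with hodef
        have holen : o + 7 ≤ j := by
          have := hop.length_le
          simp only [List.length_drop, hsegl, show pvOpen.length = 7 from by decide] at this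
          omega
        have hso : pvOpen <+: s.drop o := by
          have h1 := hop
          rw [List.drop_take] at h1
          exact (List.prefix_take_iff.mp h1).1
        have hfino : PySem.Chars.find s pvOpen = (o : Int) := by
          apply pvFindEq _ _ _ hso
          intro m hm hcon
          apply homin m hm
          rw [List.drop_take, List.prefix_take_iff]
          exact ⟨hcon, by simp [pvOpen]; omega⟩
        have hfinc : PySem.Chars.find (s.drop (o + 7)) pvClose = ((j - (o + 7) : Nat) : Int) := by
          apply pvFindEq
          · rw [List.drop_drop, show o + 7 + (j - (o + 7)) = j from by omega]
            exact hcp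
          · intro m hm hcon
            rw [List.drop_drop] at hcon
            exact hcmin (o + 7 + m) (by omega) hcon
        rw [← hxl, ih _ hrlen (n + 1)]
        conv_rhs => rw [pvRun.eq_def]
        rw [hfino]
        rw [if_neg (show ¬((o : Int) = -1) from by omega)]
        simp only [Int.toNat_natCast]
        rw [hfinc]
        rw [if_neg (show ¬(((j - (o + 7) : Nat) : Int) = -1) from by omega)]
        simp only [Int.toNat_natCast]
        rw [show o + 7 + (j - (o + 7)) + 8 = j + 8 from by omega]
        rw [show (s.take j).take o = s.take o from by rw [List.take_take]; congr 1; omega]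
        rw [show (s.take j).drop (o + 7) = (s.drop (o + 7)).take (j - (o + 7)) from
          List.drop_take]
        simp [List.append_assoc]

-- main invariant of A: A's loop from start_index = start equals out ++ pvRun on the suffix
lemma pvKey (md : List Char) : ∀ (fuel start : Nat) (n : Int) (out : List Char),
    start ≤ md.length → md.length < start + fuel →
    pvALoop md fuel start n out = out ++ pvRun (md.drop start) n := by
  intro fuel
  induction fuel with
  | zero => intro start n out h1 h2; omega
  | succ fuel ih =>
    intro start n out h1 h2
    have h7 : pvOpen.length = 7 := by decide
    have h8 : pvClose.length = 8 := by decide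
    rw [pvALoop]
    conv_rhs => rw [pvRun.eq_def]
    simp only [PySem.Chars.slice_eq_listSlice]
    by_cases hi : PySem.Chars.find (md.drop start) pvOpen = -1
    · -- no <chunk>: both sides append the remaining suffix unchanged
      have hff : PySem.Chars.findFrom md pvOpen ↑start = -1 := by
        rw [PySem.Chars.findFrom_natCast md pvOpen start h1, if_pos hi]
      rw [hff, if_pos (show (-1 : Int) = -1 from rfl)]
      rw [if_pos hi]
      rw [PySem.List.slice_from md (by positivity : (0:Int) ≤ (start:Int))]
      simp
    · have hff : PySem.Chars.findFrom md pvOpen ↑start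
          = ↑start + PySem.Chars.find (md.drop start) pvOpen := by
        rw [PySem.Chars.findFrom_natCast md pvOpen start h1, if_neg hi]
      rw [hff]
      rw [if_neg hi]
      have h0 : 0 ≤ PySem.Chars.find (md.drop start) pvOpen := by
        have := PySem.Chars.neg_one_le_find (md.drop start) pvOpen; omega
      set i : Int := PySem.Chars.find (md.drop start) pvOpen with hidef
      have hpre1 := (PySem.Chars.find_spec h0).1
      have hlen1 : i.toNat + 7 ≤ md.length - start := by
        have := hpre1.length_le
        simp only [List.length_drop, h7] at this
        have hle := PySem.Chars.find_le_length (md.drop start) pvOpen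
        simp only [List.length_drop, ← hidef] at hle
        omega
      rw [if_neg (show ¬ ((start : Int) + i = -1) by omega)]
      have hcast1 : (start : Int) + i + 7 = ((start + i.toNat + 7 : Nat) : Int) := by
        push_cast; omega
      have hdd : (md.drop start).drop (i.toNat + 7) = md.drop (start + i.toNat + 7) := by
        rw [List.drop_drop]; ring_nf
      rw [hdd]
      by_cases hj : PySem.Chars.find (md.drop (start + i.toNat + 7)) pvClose = -1
      · -- open tag without a closing tag: both sides append the remaining suffix unchanged
        have hff2 : PySem.Chars.findFrom md pvClose ((start : Int) + i + 7) = -1 := by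
          rw [hcast1, PySem.Chars.findFrom_natCast md pvClose (start + i.toNat + 7) (by omega),
              if_pos hj]
        rw [hff2, if_pos (show (-1 : Int) = -1 from rfl)]
        rw [if_pos hj]
        rw [PySem.List.slice_from md (by positivity : (0:Int) ≤ (start:Int))]
        simp
      · have hff2 : PySem.Chars.findFrom md pvClose ((start : Int) + i + 7)
            = ((start + i.toNat + 7 : Nat) : Int)
              + PySem.Chars.find (md.drop (start + i.toNat + 7)) pvClose := by
          rw [hcast1, PySem.Chars.findFrom_natCast md pvClose (start + i.toNat + 7) (by omega),
              if_neg hj]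
        rw [hff2]
        rw [if_neg hj]
        have h0j : 0 ≤ PySem.Chars.find (md.drop (start + i.toNat + 7)) pvClose := by
          have := PySem.Chars.neg_one_le_find (md.drop (start + i.toNat + 7)) pvClose; omega
        set j : Int := PySem.Chars.find (md.drop (start + i.toNat + 7)) pvClose with hjdef
        have hpre2 := (PySem.Chars.find_spec h0j).1
        have hlen2 : j.toNat + 8 ≤ md.length - (start + i.toNat + 7) := by
          have := hpre2.length_le
          simp only [List.length_drop, h8] at this
          have hle := PySem.Chars.find_le_length (md.drop (start + i.toNat + 7)) pvClose
          simp only [List.length_drop, ← hjdef] at hle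
          omega
        rw [if_neg (show ¬ (((start + i.toNat + 7 : Nat) : Int) + j = -1) by omega)]
        have hsl1 : PySem.List.slice md (some ↑start) (some ((start : Int) + i)) =
            (md.drop start).take i.toNat := by
          have : (start : Int) + i = ((start + i.toNat : Nat) : Int) := by push_cast; omega
          rw [this, PySem.List.slice_natCast]
          congr 1; omega
        have hsl2 : PySem.List.slice md (some ((start : Int) + i + 7))
              (some (((start + i.toNat + 7 : Nat) : Int) + j)) =
            (md.drop (start + i.toNat + 7)).take j.toNat := by
          rw [hcast1]
          have he : ((start + i.toNat + 7 : Nat) : Int) + j =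
              ((start + i.toNat + 7 + j.toNat : Nat) : Int) := by push_cast; omega
          rw [he, PySem.List.slice_natCast]
          congr 1; omega
        have htoNat : (((start + i.toNat + 7 : Nat) : Int) + j).toNat + 8 =
            start + i.toNat + 7 + j.toNat + 8 := by omega
        rw [hsl1, hsl2, htoNat]
        rw [ih (start + i.toNat + 7 + j.toNat + 8) (n + 1) _ (by omega) (by omega)]
        have hdd2 : (md.drop start).drop (i.toNat + 7 + j.toNat + 8)
            = md.drop (start + i.toNat + 7 + j.toNat + 8) := by
          rw [List.drop_drop]; ring_nf
        rw [hdd2]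
        simp [List.append_assoc]

-- ===== VERDICT (by name: the statement is the Claim_ definition above) =====
theorem replace_chunk_tags_spec : Claim_equal_replace_chunk_tags := by
  intro md _
  unfold Spec_replace_chunk_tags replace_chunk_tags replace_chunk_tags_alt
  rw [pvKey md.toList (md.toList.length + 1) 0 1 [] (by omega) (by omega),
      pvBKey md.toList.length md.toList le_rfl 1 []]
  simp
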